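-- pv_equiv track=rewrite | github.com/JoaocGuerra/Lig4 | Lig4 v.4.1.py | Diagonais_Subindo_Principal
-- ===== SOURCE A (Python) =====
-- def Diagonais_Subindo_Principal(tabuleiro,jogador,linha,coluna,pecas_acaba): #Nesta função ela recebe a posiçao que o jogador pois sua peça e verifia as diagonais.
--     diagonal = 1 #Começa com um pois vamos verificar apartir do movimento do jogador.
--     nova_linha = linha
--     nova_coluna = coluna
--     for i in range(pecas_acaba-1): #Como já temos uma peça, iremos verificar as outras três posições para ver se tem o elemento do jogador.
--         nova_linha -= 1
--         nova_coluna -= 1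
--         if nova_linha < 0 or nova_coluna < 0: #Essa condição é para não ultrapassar o tamanho do tabuleiro, o que iria ocasionar 'List index out of the range'.
--             return diagonal
--         else:
--             if tabuleiro[nova_linha][nova_coluna] == jogador: #Verifica se os caracteres nas diagonais são iguais a 'O' ou 'X'.
--                 diagonal += 1
--             else: #Se o caractere não for igual ao anterior, a sequência fica com 1 novamente.
--                 diagonal = 1
--     return diagonal
-- ===== SOURCE B (Python) =====
-- def Diagonais_Subindo_Principal(tabuleiro, jogador, linha, coluna, pecas_acaba):
--     # Collect the visited cells along the up-left diagonal, then count
--     # the trailing run of matches from the end; result is that run + 1.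
--     cells = []
--     r, c = linha, coluna
--     for _ in range(pecas_acaba - 1):
--         r -= 1
--         c -= 1
--         if r < 0 or c < 0:
--             break
--         cells.append(tabuleiro[r][c])
--     run = 0
--     for cell in reversed(cells):
--         if cell != jogador:
--             break
--         run += 1
--     return run + 1
-- ===== Notes on version B (the rewrite author's own statement) =====
-- stated objective: alternative
-- what changed: Replaces A's running reset-to-1 counter with a two-phase decomposition: first collect the visited diagonal cells into a list, then count the trailing run of matching cells from the end and return it plus 1.
import Mathlib
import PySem

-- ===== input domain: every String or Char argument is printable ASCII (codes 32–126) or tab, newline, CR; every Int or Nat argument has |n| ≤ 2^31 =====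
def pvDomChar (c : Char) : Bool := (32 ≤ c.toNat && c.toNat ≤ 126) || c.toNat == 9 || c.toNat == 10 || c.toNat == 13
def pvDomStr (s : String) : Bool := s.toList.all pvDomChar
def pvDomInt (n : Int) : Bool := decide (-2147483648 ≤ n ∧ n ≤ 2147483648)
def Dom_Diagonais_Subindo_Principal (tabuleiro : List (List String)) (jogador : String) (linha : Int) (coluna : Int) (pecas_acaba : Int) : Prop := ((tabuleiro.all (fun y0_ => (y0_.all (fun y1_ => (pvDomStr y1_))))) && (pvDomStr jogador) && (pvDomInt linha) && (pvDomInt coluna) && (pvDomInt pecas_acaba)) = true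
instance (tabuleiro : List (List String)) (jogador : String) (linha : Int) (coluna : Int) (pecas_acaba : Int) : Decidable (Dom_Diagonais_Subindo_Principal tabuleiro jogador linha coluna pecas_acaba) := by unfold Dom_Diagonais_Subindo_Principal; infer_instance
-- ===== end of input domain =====

-- B re-derives A's result as 1 + (trailing run of matching cells) over the collected
-- diagonal cells, instead of A's reset-to-1 running counter: an alternative decomposition.


-- shared cell access: tabuleiro[r][c]; inside Pre_ both indexes are in range, so getD defaults are never used
def pvCellAt (tabuleiro : List (List String)) (r c : Int) : String :=
  (PySem.List.pyGet? ((PySem.List.pyGet? tabuleiro r).getD []) c).getD ""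

-- ===== PORT A =====
-- the for-loop of A, one step per fuel unit, carrying (nova_linha, nova_coluna, diagonal)
def pvALoop (tabuleiro : List (List String)) (jogador : String) : Nat → Int → Int → Int → Int
  | 0, _, _, diagonal => diagonal
  | n + 1, nova_linha, nova_coluna, diagonal =>
    let nl := nova_linha - 1
    let nc := nova_coluna - 1
    if nl < 0 ∨ nc < 0 then diagonal
    else if pvCellAt tabuleiro nl nc = jogador then
      pvALoop tabuleiro jogador n nl nc (diagonal + 1)
    else
      pvALoop tabuleiro jogador n nl nc 1

def Diagonais_Subindo_Principal (tabuleiro : List (List String)) (jogador : String) (linha : Int) (coluna : Int) (pecas_acaba : Int) : Int :=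
  pvALoop tabuleiro jogador (pecas_acaba - 1).toNat linha coluna 1

-- ===== PORT B =====
-- first loop of B: collect the visited cells along the up-left diagonal
def pvCollect (tabuleiro : List (List String)) : Nat → Int → Int → List String
  | 0, _, _ => []
  | n + 1, r, c =>
    let r' := r - 1
    let c' := c - 1
    if r' < 0 ∨ c' < 0 then []
    else pvCellAt tabuleiro r' c' :: pvCollect tabuleiro n r' c'

-- second loop of B: length of the matching prefix (applied to the reversed cell list)
def pvRun (jogador : String) : List String → Int
  | [] => 0
  | cell :: rest => if cell = jogador then 1 + pvRun jogador rest else 0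

def Diagonais_Subindo_Principal_alt (tabuleiro : List (List String)) (jogador : String) (linha : Int) (coluna : Int) (pecas_acaba : Int) : Int :=
  pvRun jogador (pvCollect tabuleiro (pecas_acaba - 1).toNat linha coluna).reverse + 1

-- ===== PRECONDITION & SPEC =====
-- Pre_ excludes exactly the inputs on which A raises IndexError: a visited diagonal cell
-- whose (non-negative) row or column index is beyond the board's extent.
def Pre_Diagonais_Subindo_Principal (tabuleiro : List (List String)) (jogador : String) (linha : Int) (coluna : Int) (pecas_acaba : Int) : Prop :=
  (min (pecas_acaba - 1) (min linha coluna) < 1 ∨ linha - 1 < (tabuleiro.length : Int)) ∧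
  ∀ r ∈ List.range tabuleiro.length,
    1 ≤ linha - (r : Int) → linha - (r : Int) ≤ min (pecas_acaba - 1) (min linha coluna) →
      coluna - (linha - (r : Int)) < (((PySem.List.pyGet? tabuleiro (r : Int)).getD []).length : Int)
instance (tabuleiro : List (List String)) (jogador : String) (linha : Int) (coluna : Int) (pecas_acaba : Int) : Decidable (Pre_Diagonais_Subindo_Principal tabuleiro jogador linha coluna pecas_acaba) := by unfold Pre_Diagonais_Subindo_Principal; infer_instance

def pvWitness_Diagonais_Subindo_Principal : List (List String) × String × Int × Int × Int :=
  ([["X", "O"], ["O", "X"]], "X", 1, 1, 4)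

def Spec_Diagonais_Subindo_Principal (tabuleiro : List (List String)) (jogador : String) (linha : Int) (coluna : Int) (pecas_acaba : Int) (out : Int) : Prop := out = Diagonais_Subindo_Principal_alt tabuleiro jogador linha coluna pecas_acaba
instance (tabuleiro : List (List String)) (jogador : String) (linha : Int) (coluna : Int) (pecas_acaba : Int) (out : Int) : Decidable (Spec_Diagonais_Subindo_Principal tabuleiro jogador linha coluna pecas_acaba out) := by unfold Spec_Diagonais_Subindo_Principal; infer_instance

-- ===== CLAIM (what is proved, stated in full; the proofs are below) =====
def Claim_equal_Diagonais_Subindo_Principal : Prop := ∀ (tabuleiro : List (List String)) (jogador : String) (linha : Int) (coluna : Int) (pecas_acaba : Int), Dom_Diagonais_Subindo_Principal tabuleiro jogador linha coluna pecas_acaba → Pre_Diagonais_Subindo_Principal tabuleiro jogador linha coluna pecas_acaba → Spec_Diagonais_Subindo_Principal tabuleiro jogador linha coluna pecas_acaba (Diagonais_Subindo_Principal tabuleiro jogador linha coluna pecas_acaba)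

-- ===== LEMMAS AND PROOFS =====

theorem pvRun_append (jogador : String) (l t : List String) :
    pvRun jogador (l ++ t) =
      if l.all (fun x => x = jogador) then (l.length : Int) + pvRun jogador t else pvRun jogador l := by
  induction l with
  | nil => simp [pvRun]
  | cons x xs ih =>
    by_cases hx : x = jogador <;> simp [pvRun, hx, ih] <;> split_ifs <;> push_cast <;> ring

theorem pvRun_all (jogador : String) (l : List String) (h : l.all (fun x => x = jogador)) :
    pvRun jogador l = (l.length : Int) := by
  have := pvRun_append jogador l []
  simpa [pvRun, h] using this

-- the key invariant: A's loop value is d + |cells| if every visited cell matches,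
-- else 1 + the trailing matching run of the visited cells
theorem pvALoop_eq (tabuleiro : List (List String)) (jogador : String) :
    ∀ (fuel : Nat) (r c d : Int),
      pvALoop tabuleiro jogador fuel r c d =
        (if (pvCollect tabuleiro fuel r c).all (fun x => x = jogador)
         then d + ((pvCollect tabuleiro fuel r c).length : Int)
         else 1 + pvRun jogador (pvCollect tabuleiro fuel r c).reverse) := by
  intro fuel
  induction fuel with
  | zero => intro r c d; simp [pvALoop, pvCollect]
  | succ n ih =>
    intro r c d
    by_cases hb : r - 1 < 0 ∨ c - 1 < 0
    · have hb' : r < 1 ∨ c < 1 := by omega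
      simp [pvALoop, pvCollect, hb', pvRun]
    · have hb' : ¬ (r < 1 ∨ c < 1) := by omega
      by_cases hm : pvCellAt tabuleiro (r - 1) (c - 1) = jogador
      · rw [show pvALoop tabuleiro jogador (n+1) r c d
              = pvALoop tabuleiro jogador n (r-1) (c-1) (d+1) by simp [pvALoop, hb', hm],
            show pvCollect tabuleiro (n+1) r c
              = pvCellAt tabuleiro (r-1) (c-1) :: pvCollect tabuleiro n (r-1) (c-1) by
                simp [pvCollect, hb']]
        rw [ih]
        by_cases ha : (pvCollect tabuleiro n (r-1) (c-1)).all (fun x => x = jogador)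
        · simp [ha, hm]; push_cast; ring
        · have ha' : ¬ (pvCollect tabuleiro n (r-1) (c-1)).reverse.all (fun x => x = jogador) := by
            simpa using ha
          simp only [List.reverse_cons, ha, hm, List.all_cons, decide_eq_true_eq,
            if_neg, and_true, if_true]
          rw [pvRun_append, if_neg ha']
          simp [ha, hm]
      · rw [show pvALoop tabuleiro jogador (n+1) r c d
              = pvALoop tabuleiro jogador n (r-1) (c-1) 1 by simp [pvALoop, hb', hm],
            show pvCollect tabuleiro (n+1) r c
              = pvCellAt tabuleiro (r-1) (c-1) :: pvCollect tabuleiro n (r-1) (c-1) by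
                simp [pvCollect, hb']]
        rw [ih]
        have hcsall : ¬ (pvCellAt tabuleiro (r-1) (c-1) :: pvCollect tabuleiro n (r-1) (c-1)).all
            (fun x => x = jogador) := by simp [hm]
        rw [if_neg hcsall, List.reverse_cons, pvRun_append]
        by_cases ha : (pvCollect tabuleiro n (r-1) (c-1)).all (fun x => x = jogador)
        · have ha' : (pvCollect tabuleiro n (r-1) (c-1)).reverse.all (fun x => x = jogador) := by
            simpa using ha
          simp [ha, ha', pvRun, hm]
        · have ha' : ¬ (pvCollect tabuleiro n (r-1) (c-1)).reverse.all (fun x => x = jogador) := by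
            simpa using ha
          simp [ha, ha']

-- ===== VERDICT (by name: the statement is the Claim_ definition above) =====
theorem Diagonais_Subindo_Principal_spec : Claim_equal_Diagonais_Subindo_Principal := by
  intro tabuleiro jogador linha coluna pecas_acaba _hDom _hPre
  unfold Spec_Diagonais_Subindo_Principal Diagonais_Subindo_Principal Diagonais_Subindo_Principal_alt
  rw [pvALoop_eq]
  set cs := pvCollect tabuleiro (pecas_acaba - 1).toNat linha coluna with hcs
  by_cases ha : cs.all (fun x => x = jogador)
  · have ha' : cs.reverse.all (fun x => x = jogador) := by simpa using ha
    rw [if_pos ha, pvRun_all jogador cs.reverse ha']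
    simp [add_comm]
  · rw [if_neg ha]; ring
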